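-- pv_equiv track=rewrite | github.com/jt-kf/sailing-races | race_teams.py | create_race_array
-- ===== SOURCE A (Python) =====
-- def create_race_array(teams, races, boats_per_race):
--     race_array = []
--     team_counter = 0
--
--     for _ in range(races):
--         race = []
--         for _ in range(boats_per_race):
--             race.append(team_counter)
--             team_counter = (team_counter + 1) % teams
--         race_array.append(race)
--
--     return race_array
-- ===== SOURCE B (Python) =====
-- def create_race_array(teams, races, boats_per_race):
--     return [[(i * boats_per_race + j) % teams for j in range(boats_per_race)]
--             for i in range(races)]
-- ===== Notes on version B (the rewrite author's own statement) =====
-- stated objective: simpler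
-- what changed: Replaced the cross-row mutable team counter with a closed-form positional formula (i*boats_per_race + j) % teams in a nested comprehension, keeping no state between rows.
import Mathlib
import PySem

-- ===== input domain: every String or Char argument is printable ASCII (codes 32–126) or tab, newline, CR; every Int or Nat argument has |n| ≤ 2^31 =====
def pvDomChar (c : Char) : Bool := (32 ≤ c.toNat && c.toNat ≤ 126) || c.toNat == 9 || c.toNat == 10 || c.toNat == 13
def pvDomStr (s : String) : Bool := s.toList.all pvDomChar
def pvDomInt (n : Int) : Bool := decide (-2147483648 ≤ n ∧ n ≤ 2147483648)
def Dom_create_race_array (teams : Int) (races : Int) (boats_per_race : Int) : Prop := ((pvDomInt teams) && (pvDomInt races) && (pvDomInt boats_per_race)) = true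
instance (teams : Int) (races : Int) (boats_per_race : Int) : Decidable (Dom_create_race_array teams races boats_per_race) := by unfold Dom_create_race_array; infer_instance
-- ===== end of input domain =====

-- B replaces A's cross-row running counter with the closed-form positional formula
-- (i*boats_per_race + j) % teams in a nested comprehension (objective: simpler).

-- ===== PORT A =====
-- literal transliteration: outer loop carries (race_array, team_counter); inner loop carries (race, team_counter)
def create_race_array (teams : Int) (races : Int) (boats_per_race : Int) : List (List Int) :=
  (((PySem.List.pyRange 0 races 1).foldl
      (fun (st : List (List Int) × Int) _ =>
        let inner := (PySem.List.pyRange 0 boats_per_race 1).foldl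
          (fun (ri : List Int × Int) _ =>
            (ri.1 ++ [ri.2], PySem.Int.mod (ri.2 + 1) teams))
          ([], st.2)
        (st.1 ++ [inner.1], inner.2))
      ([], 0))).1

-- ===== PORT B =====
def create_race_array_alt (teams : Int) (races : Int) (boats_per_race : Int) : List (List Int) :=
  (PySem.List.pyRange 0 races 1).map (fun i =>
    (PySem.List.pyRange 0 boats_per_race 1).map (fun j =>
      PySem.Int.mod (i * boats_per_race + j) teams))

-- ===== PRECONDITION & SPEC =====
-- Pre_ excludes exactly the inputs where the Python A raises ZeroDivisionError
-- (teams == 0 with at least one element to place); B raises there too.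
def Pre_create_race_array (teams : Int) (races : Int) (boats_per_race : Int) : Prop :=
  teams ≠ 0 ∨ races ≤ 0 ∨ boats_per_race ≤ 0
instance (teams : Int) (races : Int) (boats_per_race : Int) : Decidable (Pre_create_race_array teams races boats_per_race) := by unfold Pre_create_race_array; infer_instance

def pvWitness_create_race_array : Int × Int × Int := (3, 2, 2)

def Spec_create_race_array (teams : Int) (races : Int) (boats_per_race : Int) (out : List (List Int)) : Prop := out = create_race_array_alt teams races boats_per_race
instance (teams : Int) (races : Int) (boats_per_race : Int) (out : List (List Int)) : Decidable (Spec_create_race_array teams races boats_per_race out) := by unfold Spec_create_race_array; infer_instance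

-- ===== CLAIM (what is proved, stated in full; the proofs are below) =====
def Claim_equal_create_race_array : Prop := ∀ (teams : Int) (races : Int) (boats_per_race : Int), Dom_create_race_array teams races boats_per_race → Pre_create_race_array teams races boats_per_race → Spec_create_race_array teams races boats_per_race (create_race_array teams races boats_per_race)

-- ===== LEMMAS AND PROOFS =====

-- Python's `%` (= Int.fmod) absorbs an inner `%` by the same modulus, for every modulus.
theorem pv_mod_add_one (a t : Int) :
    PySem.Int.mod (PySem.Int.mod a t + 1) t = PySem.Int.mod (a + 1) t := by
  show Int.fmod (Int.fmod a t + 1) t = Int.fmod (a + 1) t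
  rw [Int.add_fmod, Int.fmod_fmod_of_dvd _ (dvd_refl t), ← Int.add_fmod]

-- the inner loop: counter starts at (x % t); it appends x%t, (x+1)%t, …
theorem pv_inner_fold (t : Int) (l : List Int) (acc : List Int) (x : Int) :
    l.foldl (fun (ri : List Int × Int) _ =>
        (ri.1 ++ [ri.2], PySem.Int.mod (ri.2 + 1) t))
      (acc, PySem.Int.mod x t)
    = (acc ++ (List.range l.length).map (fun j : Nat => PySem.Int.mod (x + (j : Int)) t),
       PySem.Int.mod (x + (l.length : Int)) t) := by
  induction l generalizing acc x with
  | nil => simp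
  | cons hd tl ih =>
    simp only [List.foldl_cons]
    rw [pv_mod_add_one, ih (acc ++ [PySem.Int.mod x t]) (x + 1)]
    refine Prod.ext ?_ ?_
    · dsimp only
      rw [List.length_cons, List.range_succ_eq_map, List.map_cons, List.map_map,
          List.append_assoc, List.singleton_append]
      refine congrArg (acc ++ ·) ?_
      refine congr (congrArg List.cons ?_) ?_
      · norm_num
      · apply List.map_congr_left
        intro j _
        simp only [Function.comp_apply]
        congr 1
        push_cast
        ring
    · dsimp only
      rw [List.length_cons]
      congr 1
      push_cast
      ring

-- the outer loop: after i rows the counter equals (i * bn) % t, bn = boats_per_race.toNat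
theorem pv_outer_fold (t boats : Int) (l : List Int) (rowsacc : List (List Int)) (i : Nat) :
    l.foldl (fun (st : List (List Int) × Int) _ =>
        let inner := (PySem.List.pyRange 0 boats 1).foldl
          (fun (ri : List Int × Int) _ =>
            (ri.1 ++ [ri.2], PySem.Int.mod (ri.2 + 1) t))
          ([], st.2)
        (st.1 ++ [inner.1], inner.2))
      (rowsacc, PySem.Int.mod ((i * boats.toNat : Nat) : Int) t)
    = (rowsacc ++ (List.range l.length).map (fun k : Nat =>
         (List.range boats.toNat).map (fun j : Nat =>
           PySem.Int.mod ((((i + k) * boats.toNat + j : Nat) : Int)) t)),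
       PySem.Int.mod ((((i + l.length) * boats.toNat : Nat) : Int)) t) := by
  induction l generalizing rowsacc i with
  | nil => simp
  | cons hd tl ih =>
    simp only [List.foldl_cons]
    have hlen : (PySem.List.pyRange 0 boats 1).length = boats.toNat := by
      rw [PySem.List.length_pyRange_one]; simp
    rw [pv_inner_fold t (PySem.List.pyRange 0 boats 1) [] ((i * boats.toNat : Nat) : Int)]
    rw [hlen]
    have hnext : PySem.Int.mod (((i * boats.toNat : Nat) : Int) + ((boats.toNat : Nat) : Int)) t
        = PySem.Int.mod (((i + 1) * boats.toNat : Nat) : Int) t := by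
      congr 1; push_cast; ring
    rw [hnext, ih (rowsacc ++ [_]) (i + 1)]
    refine Prod.ext ?_ ?_
    · dsimp only
      rw [List.length_cons, List.range_succ_eq_map, List.map_cons, List.map_map,
          List.append_assoc, List.singleton_append]
      refine congrArg (rowsacc ++ ·) ?_
      refine congr (congrArg List.cons ?_) ?_
      · simp only [List.nil_append]
        apply List.map_congr_left
        intro j _
        congr 1
      · apply List.map_congr_left
        intro k _
        simp only [Function.comp_apply]
        apply List.map_congr_left
        intro j _
        congr 1
        push_cast
        ring
    · dsimp only
      rw [List.length_cons]
      congr 1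
      push_cast
      ring

-- ===== VERDICT (by name: the statement is the Claim_ definition above) =====
theorem create_race_array_spec : Claim_equal_create_race_array := by
  intro t races boats _ _
  show create_race_array t races boats = create_race_array_alt t races boats
  unfold create_race_array create_race_array_alt
  have key := pv_outer_fold t boats (PySem.List.pyRange 0 races 1) [] 0
  have h0 : PySem.Int.mod (((0 * boats.toNat : Nat) : Int)) t = 0 := by
    show Int.fmod _ t = 0
    simp
  rw [h0] at key
  rw [key]
  simp only [List.nil_append]
  have hlen : (PySem.List.pyRange 0 races 1).length = races.toNat := by
    rw [PySem.List.length_pyRange_one]; simp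
  rw [hlen, PySem.List.pyRange_one 0 races]
  rw [List.map_map]
  have hr : (races - 0).toNat = races.toNat := by omega
  rw [hr]
  apply List.map_congr_left
  intro k _
  simp only [Function.comp_apply]
  rw [PySem.List.pyRange_one 0 boats, List.map_map]
  have hb : (boats - 0).toNat = boats.toNat := by omega
  rw [hb]
  apply List.map_congr_left
  intro j hj
  simp only [Function.comp_apply]
  have hjb : (j : Int) < boats := by
    have := List.mem_range.mp hj
    omega
  have hbe : ((boats.toNat : Nat) : Int) = boats := by omega
  congr 1
  push_cast
  rw [hbe]
  ring
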